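-- pv_equiv track=rewrite | github.com/ELink0/birthday-attack | main.py | substitui_tag
-- ===== SOURCE A (Python) =====
-- def substitui_tag(texto, adjetivos):
--     texto_novo = ""
--     z = 0
--     estado = "fora"
--
--     for i in texto:
--         if estado == "fora":
--             if i != "<":
--                 texto_novo += i
--             else:
--                 texto_novo += str(adjetivos[z])
--                 estado = "dentro"
--
--         elif estado == "dentro":
--             if i == ">":
--                 estado = "fora"
--                 z += 1
--     return texto_novo
-- ===== SOURCE B (Python) =====
-- def substitui_tag(texto, adjetivos):
--     # Jump from tag to tag with str.find and slicing instead of a per-character state machine.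
--     parts = []
--     z = 0
--     i = 0
--     while True:
--         j = texto.find('<', i)
--         if j == -1:
--             parts.append(texto[i:])
--             break
--         parts.append(texto[i:j])
--         parts.append(str(adjetivos[z]))
--         z += 1
--         k = texto.find('>', j + 1)
--         if k == -1:
--             break
--         i = k + 1
--     return ''.join(parts)
-- ===== Notes on version B (the rewrite author's own statement) =====
-- stated objective: idiomatic
-- what changed: B replaces A's per-character fora/dentro state machine and string concatenation with find-and-slice jumps from one '<' to the matching '>' plus a final ''.join, accessing adjetivos at the same tags so results and the IndexError point coincide.
import Mathlib
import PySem

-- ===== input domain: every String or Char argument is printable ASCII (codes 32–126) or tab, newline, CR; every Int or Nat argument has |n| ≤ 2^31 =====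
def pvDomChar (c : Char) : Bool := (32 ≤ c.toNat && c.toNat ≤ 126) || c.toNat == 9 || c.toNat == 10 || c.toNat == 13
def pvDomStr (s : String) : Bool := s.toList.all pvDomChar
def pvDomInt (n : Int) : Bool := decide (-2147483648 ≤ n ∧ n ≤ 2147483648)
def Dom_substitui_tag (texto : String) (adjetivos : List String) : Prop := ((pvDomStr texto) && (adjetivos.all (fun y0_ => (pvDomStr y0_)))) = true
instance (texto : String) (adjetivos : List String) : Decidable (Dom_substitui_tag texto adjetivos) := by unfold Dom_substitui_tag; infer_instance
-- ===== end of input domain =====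

-- B replaces A's per-character fora/dentro state machine with find-and-slice jumps from one
-- tag to the next (objective: simpler/idiomatic); return values agree on Pre_ (where A returns).

-- ===== PORT A =====
-- A's character loop with state (texto_novo, z, estado); 'adjetivos[z]' out of range
-- (Python IndexError) is modelled by 'none'; Pre_ excludes exactly those inputs.
def substitui_tagGoA (cs : List Char) (acc : List Char) (z : Nat) (dentro : Bool)
    (adj : List String) : Option String :=
  match cs with
  | [] => some (String.mk acc)
  | c :: rest =>
    if dentro then
      if c = '>' then substitui_tagGoA rest acc (z + 1) false adj
      else substitui_tagGoA rest acc z true adj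
    else
      if c = '<' then
        match adj[z]? with
        | none => none
        | some a => substitui_tagGoA rest (acc ++ a.toList) z true adj
      else substitui_tagGoA rest (acc ++ [c]) z false adj

def substitui_tag (texto : String) (adjetivos : List String) : String :=
  (substitui_tagGoA texto.toList [] 0 false adjetivos).getD ""

-- ===== PORT B =====
-- Source B: texto.find('<', i) / texto.find('>', j+1) and slicing become takeWhile/dropWhile/tail on
-- the remaining characters (exact: find = first occurrence, slice = the prefix before it).
def substitui_tagGoB (cs : List Char) (z : Nat) (adj : List String) : Option (List Char) :=
  let pre := cs.takeWhile (· ≠ '<')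
  let rest := cs.dropWhile (· ≠ '<')
  if hrest : rest = [] then some pre
  else
    match adj[z]? with
    | none => none
    | some a =>
      let rest2 := rest.tail.dropWhile (· ≠ '>')
      if rest2 = [] then some (pre ++ a.toList)
      else (substitui_tagGoB rest2.tail (z + 1) adj).map (fun out => pre ++ a.toList ++ out)
termination_by cs.length
decreasing_by
  have h1 : (cs.dropWhile (· ≠ '<')).length ≤ cs.length := List.length_dropWhile_le _ _
  have h2 : (cs.dropWhile (· ≠ '<')).tail.length < (cs.dropWhile (· ≠ '<')).length := by
    cases hce : cs.dropWhile (· ≠ '<') with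
    | nil => exact absurd hce hrest
    | cons d r => simp
  have h3 : ((cs.dropWhile (· ≠ '<')).tail.dropWhile (· ≠ '>')).length
      ≤ (cs.dropWhile (· ≠ '<')).tail.length := List.length_dropWhile_le _ _
  have h4 : ((cs.dropWhile (· ≠ '<')).tail.dropWhile (· ≠ '>')).tail.length
      ≤ ((cs.dropWhile (· ≠ '<')).tail.dropWhile (· ≠ '>')).length := by
    cases (cs.dropWhile (· ≠ '<')).tail.dropWhile (· ≠ '>') <;> simp
  omega

def substitui_tag_alt (texto : String) (adjetivos : List String) : String :=
  ((substitui_tagGoB texto.toList 0 adjetivos).map String.mk).getD ""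

-- ===== PRECONDITION & SPEC =====
-- Pre_ excludes exactly the inputs where A raises IndexError (adjetivos exhausted): A opens one
-- tag per '>'-delimited segment of texto that contains '<', and returns iff that count ≤ |adjetivos|.
def Pre_substitui_tag (texto : String) (adjetivos : List String) : Prop :=
  ((texto.toList.splitOn '>').filter (fun s => '<' ∈ s)).length ≤ adjetivos.length
instance (texto : String) (adjetivos : List String) : Decidable (Pre_substitui_tag texto adjetivos) := by
  unfold Pre_substitui_tag; infer_instance
def pvWitness_substitui_tag : String × List String := ("ola <tag> mundo", ["lindo"])

def Spec_substitui_tag (texto : String) (adjetivos : List String) (out : String) : Prop := out = substitui_tag_alt texto adjetivos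
instance (texto : String) (adjetivos : List String) (out : String) : Decidable (Spec_substitui_tag texto adjetivos out) := by unfold Spec_substitui_tag; infer_instance

-- ===== CLAIM (what is proved, stated in full; the proofs are below) =====
def Claim_equal_substitui_tag : Prop := ∀ (texto : String) (adjetivos : List String), Dom_substitui_tag texto adjetivos → Pre_substitui_tag texto adjetivos → Spec_substitui_tag texto adjetivos (substitui_tag texto adjetivos)

-- ===== LEMMAS AND PROOFS =====

-- Inside a tag, A just skips to the character after the next '>' and bumps z.
theorem goA_dentro (cs : List Char) (acc : List Char) (z : Nat) (adj : List String) :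
    substitui_tagGoA cs acc z true adj =
      match cs.dropWhile (· ≠ '>') with
      | [] => some (String.mk acc)
      | _ :: r => substitui_tagGoA r acc (z + 1) false adj := by
  induction cs with
  | nil => simp [substitui_tagGoA]
  | cons c rest ih =>
    by_cases hc : c = '>'
    · simp [substitui_tagGoA, hc, List.dropWhile]
    · simp [substitui_tagGoA, hc, List.dropWhile, ih]

-- One-step unfoldings of B's scan at a cons cell.
theorem goB_cons_ne (c : Char) (rest : List Char) (z : Nat) (adj : List String)
    (hc : ¬ c = '<') :
    substitui_tagGoB (c :: rest) z adj = (substitui_tagGoB rest z adj).map (c :: ·) := by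
  rw [substitui_tagGoB, substitui_tagGoB]
  have hd : List.dropWhile (· ≠ '<') (c :: rest) = List.dropWhile (· ≠ '<') rest := by
    rw [List.dropWhile_cons]; simp [hc]
  have ht : List.takeWhile (· ≠ '<') (c :: rest) = c :: List.takeWhile (· ≠ '<') rest := by
    rw [List.takeWhile_cons]; simp [hc]
  simp only [hd, ht]
  by_cases hr : List.dropWhile (· ≠ '<') rest = []
  · rw [dif_pos hr, dif_pos hr]; simp
  · rw [dif_neg hr, dif_neg hr]
    cases adj[z]? with
    | none => rfl
    | some a =>
      simp only []
      by_cases h2 : (List.dropWhile (· ≠ '<') rest).tail.dropWhile (· ≠ '>') = []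
      · rw [if_pos h2, if_pos h2]; simp
      · rw [if_neg h2, if_neg h2]
        cases substitui_tagGoB ((List.dropWhile (· ≠ '<') rest).tail.dropWhile (· ≠ '>')).tail (z + 1) adj <;> simp

theorem goB_cons_lt (rest : List Char) (z : Nat) (adj : List String) :
    substitui_tagGoB ('<' :: rest) z adj =
      match adj[z]? with
      | none => none
      | some a =>
        match rest.dropWhile (· ≠ '>') with
        | [] => some a.toList
        | _ :: rest3 => (substitui_tagGoB rest3 (z + 1) adj).map (fun out => a.toList ++ out)
      := by
  rw [substitui_tagGoB]
  have hd : List.dropWhile (· ≠ '<') ('<' :: rest) = '<' :: rest := by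
    rw [List.dropWhile_cons]; simp
  have ht : List.takeWhile (· ≠ '<') ('<' :: rest) = ([] : List Char) := by
    rw [List.takeWhile_cons]; simp
  simp only [hd, ht, List.tail_cons]
  rw [dif_neg (List.cons_ne_nil _ _)]
  cases adj[z]? with
  | none => rfl
  | some a =>
    simp only []
    cases h2 : rest.dropWhile (· ≠ '>') with
    | nil => simp
    | cons d rest3 => simp [List.cons_ne_nil]

-- Main invariant: A's state machine in the 'fora' state equals B's tag-jumping scan.
theorem goA_eq_goB (n : Nat) (cs : List Char) (acc : List Char) (z : Nat) (adj : List String)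
    (hn : cs.length ≤ n) :
    substitui_tagGoA cs acc z false adj =
      (substitui_tagGoB cs z adj).map (fun out => String.mk (acc ++ out)) := by
  induction n generalizing cs acc z with
  | zero =>
    have : cs = [] := List.eq_nil_of_length_eq_zero (Nat.le_zero.mp hn)
    subst this
    rw [substitui_tagGoB]
    simp [substitui_tagGoA]
  | succ n ih =>
    match cs with
    | [] =>
      rw [substitui_tagGoB]
      simp [substitui_tagGoA]
    | c :: rest =>
      by_cases hc : c = '<'
      · subst hc
        rw [goB_cons_lt]
        have hA : substitui_tagGoA ('<' :: rest) acc z false adj =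
            match adj[z]? with
            | none => none
            | some a => substitui_tagGoA rest (acc ++ a.toList) z true adj := by
          simp [substitui_tagGoA]
        rw [hA]
        cases ha : adj[z]? with
        | none => simp
        | some a =>
          simp only []
          rw [goA_dentro]
          cases h2 : rest.dropWhile (· ≠ '>') with
          | nil => simp
          | cons d rest3 =>
            have hlen : rest3.length ≤ n := by
              have := List.length_dropWhile_le (fun x => decide (x ≠ '>')) rest
              rw [h2] at this; simp at this; simp at hn; omega
            simp only [ih rest3 (acc ++ a.toList) (z + 1) hlen]
            cases substitui_tagGoB rest3 (z + 1) adj <;> simp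
      · have hstep : substitui_tagGoA (c :: rest) acc z false adj
            = substitui_tagGoA rest (acc ++ [c]) z false adj := by
          simp [substitui_tagGoA, hc]
        rw [hstep, ih rest (acc ++ [c]) z (by simp at hn; omega), goB_cons_ne c rest z adj hc]
        cases substitui_tagGoB rest z adj <;> simp

-- ===== VERDICT (by name: the statement is the Claim_ definition above) =====
theorem substitui_tag_spec : Claim_equal_substitui_tag := by
  intro texto adjetivos _ _
  unfold Spec_substitui_tag substitui_tag substitui_tag_alt
  rw [goA_eq_goB texto.toList.length texto.toList [] 0 adjetivos le_rfl]
  cases substitui_tagGoB texto.toList 0 adjetivos <;> simp
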